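-- pv_equiv track=rewrite | github.com/ryszardtuora/parliament | read.py | join_subsequent_speeches
-- ===== SOURCE A (Python) =====
-- def join_subsequent_speeches(speeches):
--   joined_speeches = []
--   prev_author = None
--   for author, speech in speeches:
--     if author == prev_author:
--       index = len(joined_speeches) -1
--       _, prev_speech = joined_speeches[index]
--       prev_speech += speech
--       joined_speeches[index] = (prev_author, prev_speech)
--     else:
--       joined_speeches.append((author, speech))
--     prev_author = author
--   return joined_speeches
-- ===== SOURCE B (Python) =====
-- def join_subsequent_speeches(speeches):
--   # Stage 1: boundary indices where a new author run starts.
--   starts = [i for i in range(len(speeches))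
--             if i == 0 or speeches[i][0] != speeches[i - 1][0]]
--   bounds = starts + [len(speeches)]
--   # Stage 2: slice out each run and join its speeches.
--   return [(speeches[b][0], ''.join(s for _, s in speeches[b:e]))
--           for b, e in zip(bounds, bounds[1:])]
-- ===== Notes on version B (the rewrite author's own statement) =====
-- stated objective: alternative
-- what changed: Replaces A's single accumulator pass (prev_author sentinel, in-place += edit of the result's last entry) by two staged passes: first compute the run-boundary indices with a range comprehension, then slice each run out of the input and ''.join its speeches.
import Mathlib
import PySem

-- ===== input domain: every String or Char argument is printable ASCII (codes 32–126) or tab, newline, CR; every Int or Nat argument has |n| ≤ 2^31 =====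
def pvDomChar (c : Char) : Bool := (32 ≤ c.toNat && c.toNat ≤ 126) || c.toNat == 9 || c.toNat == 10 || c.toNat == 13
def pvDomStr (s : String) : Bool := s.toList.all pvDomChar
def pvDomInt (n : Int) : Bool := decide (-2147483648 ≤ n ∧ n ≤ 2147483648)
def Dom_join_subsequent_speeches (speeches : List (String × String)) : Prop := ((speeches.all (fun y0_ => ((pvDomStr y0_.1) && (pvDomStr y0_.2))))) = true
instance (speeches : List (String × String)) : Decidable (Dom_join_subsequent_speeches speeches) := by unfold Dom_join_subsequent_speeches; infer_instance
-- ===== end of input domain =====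

-- B replaces A's single accumulator pass (prev_author sentinel, in-place edit of the
-- result's last entry) by two staged passes: first compute the run-boundary indices,
-- then slice each run out and join its speeches; alternative decomposition, same cost.

-- ===== PORT A =====
-- loop body of A; state = (joined_speeches, prev_author)
def pvStepA (st : List (String × String) × Option String) (p : String × String) :
    List (String × String) × Option String :=
  let author := p.1
  let speech := p.2
  let joined_speeches := st.1
  let prev_author := st.2
  let joined :=
    if some author == prev_author then
      let index : Int := (joined_speeches.length : Int) - 1
      match PySem.List.pyGet? joined_speeches index with
      | some pr =>
        -- prev_speech += speech; joined[index] = (prev_author, prev_speech); here prev_author = author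
        PySem.List.pySetD joined_speeches index (author, pr.2 ++ speech)
      | none => joined_speeches   -- IndexError branch: unreachable (prev_author set only after an append)
    else
      joined_speeches ++ [(author, speech)]
  (joined, some author)

def join_subsequent_speeches (speeches : List (String × String)) : List (String × String) :=
  (speeches.foldl pvStepA ([], none)).1

-- ===== PORT B =====
-- Python indexing in B is always in range, so pyGetD's default is never read.
def pvDflt : String × String := ("", "")

-- starts = [i for i in range(len(speeches)) if i == 0 or speeches[i][0] != speeches[i-1][0]]
def pvStarts (speeches : List (String × String)) : List Int :=
  (PySem.List.pyRange 0 (speeches.length : Int) 1).filter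
    (fun i => i == 0 ||
      ((PySem.List.pyGetD speeches i pvDflt).1 != (PySem.List.pyGetD speeches (i - 1) pvDflt).1))

-- bounds = starts + [len(speeches)]
def pvBounds (speeches : List (String × String)) : List Int :=
  pvStarts speeches ++ [(speeches.length : Int)]

-- one output pair from (b, e): (speeches[b][0], ''.join(s for _, s in speeches[b:e]))
def pvBuild (speeches : List (String × String)) (be : Int × Int) : String × String :=
  ((PySem.List.pyGetD speeches be.1 pvDflt).1,
   PySem.Str.join "" ((PySem.List.slice speeches (some be.1) (some be.2)).map Prod.snd))

-- [(…) for b, e in zip(bounds, bounds[1:])]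
def join_subsequent_speeches_alt (speeches : List (String × String)) : List (String × String) :=
  ((pvBounds speeches).zip (PySem.List.slice (pvBounds speeches) (some 1) none)).map
    (pvBuild speeches)

-- ===== PRECONDITION & SPEC =====
def Spec_join_subsequent_speeches (speeches : List (String × String)) (out : List (String × String)) : Prop := out = join_subsequent_speeches_alt speeches
instance (speeches : List (String × String)) (out : List (String × String)) : Decidable (Spec_join_subsequent_speeches speeches out) := by unfold Spec_join_subsequent_speeches; infer_instance

-- ===== CLAIM (what is proved, stated in full; the proofs are below) =====
def Claim_equal_join_subsequent_speeches : Prop := ∀ (speeches : List (String × String)), Dom_join_subsequent_speeches speeches → Spec_join_subsequent_speeches speeches (join_subsequent_speeches speeches)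

-- ===== LEMMAS AND PROOFS =====

-- Common reference: the run decomposition both ports compute.
def pvRuns : List (String × String) → List (String × String)
  | [] => []
  | (a, s) :: rest =>
    (a, (rest.takeWhile (fun p => p.1 == a)).foldl (fun acc p => acc ++ p.2) s) ::
      pvRuns (rest.dropWhile (fun p => p.1 == a))
termination_by l => l.length
decreasing_by
  simp only [List.length_cons]
  exact Nat.lt_succ_of_le (List.length_dropWhile_le _ _)

-- A's loop, started just after an append of (a, s), produces acc followed by the runs of (a,s)::l.
theorem pv_key (l : List (String × String)) :
    ∀ (a s : String) (acc : List (String × String)),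
      (l.foldl pvStepA (acc ++ [(a, s)], some a)).1
        = acc ++ pvRuns ((a, s) :: l) := by
  induction l with
  | nil =>
    intro a s acc
    simp [pvRuns]
  | cons p rest ih =>
    intro a s acc
    obtain ⟨b, t⟩ := p
    by_cases h : b = a
    · subst h
      have hstep : pvStepA (acc ++ [(b, s)], some b) (b, t)
          = (acc ++ [(b, s ++ t)], some b) := by
        simp only [pvStepA]
        rw [if_pos (by simp)]
        have hlen : ((acc ++ [(b, s)]).length : Int) - 1 = (acc.length : Int) := by
          simp
        rw [hlen, PySem.List.pyGet?_append_length]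
        simp [PySem.List.pySetD_natCast]
      rw [List.foldl_cons, hstep, ih b (s ++ t) acc]
      simp [pvRuns, List.foldl_cons]
    · have hb : (b == a) = false := by simp [h]
      have hstep : pvStepA (acc ++ [(a, s)], some a) (b, t)
          = ((acc ++ [(a, s)]) ++ [(b, t)], some b) := by
        simp only [pvStepA]
        rw [if_neg (by simp [h])]
      rw [List.foldl_cons, hstep, ih b t (acc ++ [(a, s)])]
      simp [pvRuns, hb]

theorem pvA_eq_runs (speeches : List (String × String)) :
    join_subsequent_speeches speeches = pvRuns speeches := by
  unfold join_subsequent_speeches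
  cases speeches with
  | nil => simp [pvRuns]
  | cons p rest =>
    obtain ⟨a, s⟩ := p
    have hstep : pvStepA ([], none) (a, s) = ([] ++ [(a, s)], some a) := by
      simp [pvStepA]
    rw [List.foldl_cons, hstep, pv_key rest a s []]
    simp

-- ''.join(s :: xs) unfolds one string at a time.
theorem pv_join_cons (s : String) (xs : List String) :
    PySem.Str.join "" (s :: xs) = s ++ PySem.Str.join "" xs := by
  apply String.toList_inj.mp
  cases xs <;> simp [PySem.Chars.join, List.intercalate]

theorem pv_join_nil_singleton (s : String) : PySem.Str.join "" [s] = s := by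
  apply String.toList_inj.mp
  simp [PySem.Chars.join, List.intercalate]

-- the foldl concatenation of A's runs equals B's ''.join of the run
theorem pv_foldl_join (r : List (String × String)) :
    ∀ s : String, r.foldl (fun acc p => acc ++ p.2) s = PySem.Str.join "" (s :: r.map Prod.snd) := by
  induction r with
  | nil => intro s; simp [pv_join_nil_singleton]
  | cons p r ih =>
    intro s
    rw [List.foldl_cons, ih (s ++ p.2)]
    rw [List.map_cons, pv_join_cons, pv_join_cons, pv_join_cons, String.append_assoc]

-- boundary-index decomposition lemmas
theorem pv_fst_run (a s : String) (rest : List (String × String)) (m : Nat)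
    (hm : m < (rest.takeWhile (fun p => p.1 == a)).length + 1) :
    ((((a, s) :: rest).getD m pvDflt)).1 = a := by
  set r := rest.takeWhile (fun p => p.1 == a) with hr
  have hsplit : (a, s) :: rest = ((a, s) :: r) ++ rest.dropWhile (fun p => p.1 == a) := by
    simp [hr, List.takeWhile_append_dropWhile]
  rw [hsplit, List.getD_append _ _ _ m (by simpa using hm)]
  have hmem : ((a, s) :: r).getD m pvDflt ∈ (a, s) :: r := by
    rw [List.getD_eq_getElem _ _ (by simpa using hm)]
    exact List.getElem_mem _
  rcases List.mem_cons.mp hmem with h | h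
  · rw [h]
  · have := List.mem_takeWhile_imp (hr ▸ h)
    simpa using this

theorem pv_starts_cons (a s : String) (rest : List (String × String)) :
    pvStarts ((a, s) :: rest)
      = 0 :: (pvStarts (rest.dropWhile (fun p => p.1 == a))).map
          (· + (((rest.takeWhile (fun p => p.1 == a)).length + 1 : Nat) : Int)) := by
  set r := rest.takeWhile (fun p => p.1 == a) with hr
  set d := rest.dropWhile (fun p => p.1 == a) with hd
  set l := (a, s) :: rest with hl
  have hsplit : l = ((a, s) :: r) ++ d := by
    simp [hl, hr, hd, List.takeWhile_append_dropWhile]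
  have hlen : l.length = (r.length + 1) + d.length := by
    rw [hsplit]; simp; omega
  have hgetlo : ∀ m : Nat, m < r.length + 1 → ((l.getD m pvDflt)).1 = a := by
    intro m hm; exact pv_fst_run a s rest m hm
  have hgethi : ∀ m : Nat, l.getD (m + (r.length + 1)) pvDflt = d.getD m pvDflt := by
    intro m
    rw [hsplit, List.getD_append_right _ _ _ _ (by simp)]
    congr 1
    simp
  have hhead : ∀ (hne : d ≠ []), (d.head hne).1 ≠ a := by
    intro hne hcontra
    have h2 : ((d.head hne).1 == a) = false :=
      List.head_dropWhile_not (fun p : String × String => p.1 == a) hne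
    simp [hcontra] at h2
  unfold pvStarts
  rw [show ((l.length : Int)) = (((r.length + 1 : Nat) : Int) + ((d.length : Nat) : Int)) by
    rw [hlen]; push_cast; ring]
  rw [PySem.List.pyRange_one_append 0 ((r.length + 1 : Nat) : Int)
        (((r.length + 1 : Nat) : Int) + ((d.length : Nat) : Int)) (by positivity) (by omega)]
  rw [List.filter_append]
  -- part 1: the low range contributes exactly [0]
  have hpart1 :
      (PySem.List.pyRange 0 ((r.length + 1 : Nat) : Int) 1).filter
        (fun i => i == 0 ||
          ((PySem.List.pyGetD l i pvDflt).1 != (PySem.List.pyGetD l (i - 1) pvDflt).1)) = [0] := by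
    rw [PySem.List.pyRange_zero_nat (r.length + 1)]
    rw [List.range_succ_eq_map, List.map_cons, List.filter_cons]
    norm_num
    intro j hj
    refine ⟨by omega, ?_⟩
    rw [show (((j : Nat) : Int) + 1) = (((j + 1 : Nat)) : Int) by push_cast; ring]
    rw [PySem.List.pyGetD_natCast]
    have e1 := hgetlo (j + 1) (by omega)
    have e2 := hgetlo j (by omega)
    simp only [List.getD_eq_getElem?_getD] at e1 e2 ⊢
    rw [e1, e2]
  have hrange2 :
      PySem.List.pyRange ((r.length + 1 : Nat) : Int)
          (((r.length + 1 : Nat) : Int) + ((d.length : Nat) : Int)) 1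
        = (PySem.List.pyRange 0 ((d.length : Nat) : Int) 1).map
            (· + ((r.length + 1 : Nat) : Int)) := by
    rw [PySem.List.pyRange_one, PySem.List.pyRange_zero_nat, List.map_map]
    rw [show ((((r.length + 1 : Nat) : Int) + ((d.length : Nat) : Int)
          - ((r.length + 1 : Nat) : Int)).toNat) = d.length by omega]
    apply List.map_congr_left
    intro j _
    simp [Function.comp]; ring
  rw [hpart1, hrange2, List.filter_map]
  have hfilt :
      ((PySem.List.pyRange 0 ((d.length : Nat) : Int) 1).filter
        ((fun i => i == 0 ||
          ((PySem.List.pyGetD l i pvDflt).1 != (PySem.List.pyGetD l (i - 1) pvDflt).1))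
            ∘ (· + ((r.length + 1 : Nat) : Int))))
      = (PySem.List.pyRange 0 ((d.length : Nat) : Int) 1).filter
          (fun i => i == 0 ||
            ((PySem.List.pyGetD d i pvDflt).1 != (PySem.List.pyGetD d (i - 1) pvDflt).1)) := by
    apply List.filter_congr
    intro j hj
    have hjb := PySem.List.mem_pyRange_one.mp hj
    obtain ⟨m, rfl⟩ : ∃ m : Nat, j = (m : Int) := ⟨j.toNat, by omega⟩
    have hm : m < d.length := by omega
    simp only [Function.comp]
    rcases Nat.eq_zero_or_pos m with rfl | hmpos
    · -- first element of the dropped tail starts a new run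
      have hne : d ≠ [] := by
        intro h; rw [h] at hm; simp at hm
      have hda : (d.getD 0 pvDflt).1 ≠ a := by
        have hgd : d.getD 0 pvDflt = d.head hne := by
          rw [List.getD_eq_getElem _ _ (by simp [List.length_pos_iff_ne_nil, hne])]
          exact List.getElem_zero_eq_head _
        rw [hgd]; exact hhead hne
      have hg0 := hgethi 0
      simp only [Nat.zero_add] at hg0
      simp only [Nat.cast_zero, zero_add]
      rw [show (((r.length + 1 : Nat) : Int) - 1) = ((r.length : Nat) : Int) by omega]
      rw [PySem.List.pyGetD_natCast, PySem.List.pyGetD_natCast, hg0,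
        hgetlo r.length (by omega)]
      simp only [List.getD_eq_getElem?_getD] at hda
      simp [hda]
    · -- interior of the tail: both sides compare the same two authors
      have h1 : (((m : Nat) : Int) + ((r.length + 1 : Nat) : Int)) = ((m + (r.length + 1) : Nat) : Int) := by
        push_cast; ring
      rw [h1]
      rw [show (((m + (r.length + 1) : Nat) : Int) - 1) = (((m - 1) + (r.length + 1) : Nat) : Int) by omega]
      rw [show (((m : Nat) : Int) - 1) = (((m - 1 : Nat)) : Int) by omega]
      rw [PySem.List.pyGetD_natCast, PySem.List.pyGetD_natCast,
        PySem.List.pyGetD_natCast, PySem.List.pyGetD_natCast, hgethi m, hgethi (m - 1)]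
      rw [show ((((m + (r.length + 1)) : Nat) : Int) == 0) = false by simp; omega]
      rw [show (((m : Nat) : Int) == 0) = false by simp; omega]
  rw [hfilt]
  rfl

theorem pv_bounds_head (xs : List (String × String)) :
    ∃ t, pvBounds xs = 0 :: t := by
  unfold pvBounds pvStarts
  cases xs with
  | nil => exact ⟨[], by simp [PySem.List.pyRange_one_eq_nil]⟩
  | cons p rest =>
    rw [PySem.List.pyRange_one_cons (by simp)]
    rw [List.filter_cons]
    simp only [beq_self_eq_true, Bool.true_or, if_pos]
    exact ⟨_, rfl⟩

theorem pv_bounds_natCast (xs : List (String × String)) :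
    ∀ x ∈ pvBounds xs, ∃ m : Nat, x = (m : Int) := by
  intro x hx
  rcases List.mem_append.mp hx with h | h
  · have := List.mem_filter.mp h
    have hm := (PySem.List.mem_pyRange_one).mp this.1
    exact ⟨x.toNat, by omega⟩
  · exact ⟨xs.length, by simpa using h⟩

-- bounds of (a,s)::rest = 0 :: shifted bounds of the dropped tail
theorem pv_bounds_cons (a s : String) (rest : List (String × String)) :
    pvBounds ((a, s) :: rest)
      = 0 :: (pvBounds (rest.dropWhile (fun p => p.1 == a))).map
          (· + (((rest.takeWhile (fun p => p.1 == a)).length + 1 : Nat) : Int)) := by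
  unfold pvBounds
  rw [pv_starts_cons, List.map_append]
  have h := congrArg List.length
    (List.takeWhile_append_dropWhile (p := fun p : String × String => p.1 == a) (l := rest))
  simp only [List.length_append] at h
  simp
  omega

theorem pvAlt_eq_runs (speeches : List (String × String)) :
    join_subsequent_speeches_alt speeches = pvRuns speeches := by
  induction speeches using pvRuns.induct with
  | case1 =>
    unfold join_subsequent_speeches_alt pvBounds pvStarts pvRuns
    simp [PySem.List.pyRange_one_eq_nil, PySem.List.slice_from_one]
  | case2 a s rest ih =>
    set r := rest.takeWhile (fun p => p.1 == a) with hr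
    set d := rest.dropWhile (fun p => p.1 == a) with hd
    set k : Nat := r.length + 1 with hk
    set f : Int → Int := (· + (k : Int)) with hf
    obtain ⟨t, ht⟩ := pv_bounds_head d
    have hsplit : (a, s) :: rest = ((a, s) :: r) ++ d := by
      simp [hr, hd, List.takeWhile_append_dropWhile]
    have hprelen : ((a, s) :: r).length = k := by simp [hk]
    -- unfold B on the cons input and push the zip through the shift
    unfold join_subsequent_speeches_alt
    rw [PySem.List.slice_from_one, pv_bounds_cons, ← hr, ← hd, ← hk, ← hf, ht]
    rw [List.map_cons, List.tail_cons]
    have hzip : ((0 : Int) :: (f 0 :: (t.map f))).zip (f 0 :: (t.map f))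
        = (0, f 0) :: (((0 :: t).map f).zip (t.map f)) := by
      simp
    rw [hzip, List.zip_map, List.map_cons, List.map_map]
    -- head pair: the first run
    have h0 : f 0 = ((k : Nat) : Int) := by simp [hf]
    have hhead : pvBuild ((a, s) :: rest) (0, f 0)
        = (a, r.foldl (fun acc p => acc ++ p.2) s) := by
      have hslice : PySem.List.slice ((a, s) :: rest) (some (0 : Int)) (some ((k : Nat) : Int))
          = (a, s) :: r := by
        rw [PySem.List.slice_zero_start, PySem.List.slice_to_natCast, hsplit,
          List.take_left' hprelen]
      have hgd : PySem.List.pyGetD ((a, s) :: rest) (0 : Int) pvDflt = (a, s) :=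
        PySem.List.pyGetD_zero_cons _ _ _
      simp [pvBuild, h0, hslice, hgd, pv_foldl_join]
    -- tail pairs: shifted builds agree with the tail's builds
    have htail : ∀ be ∈ ((0 : Int) :: t).zip t,
        pvBuild ((a, s) :: rest) (Prod.map f f be) = pvBuild d be := by
      rintro ⟨b, e⟩ hbe
      obtain ⟨hb, he⟩ := List.of_mem_zip hbe
      obtain ⟨mb, rfl⟩ := pv_bounds_natCast d b (ht ▸ hb)
      obtain ⟨me, rfl⟩ := pv_bounds_natCast d e (ht ▸ List.mem_cons_of_mem _ he)
      have hcb : ((mb : Int) + (k : Int)) = ((mb + k : Nat) : Int) := by push_cast; ring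
      have hce : ((me : Int) + (k : Int)) = ((me + k : Nat) : Int) := by push_cast; ring
      have hget : ((a, s) :: rest).getD (mb + k) pvDflt = d.getD mb pvDflt := by
        rw [hsplit, List.getD_append_right _ _ _ _ (by rw [hprelen]; omega)]
        congr 1
        rw [hprelen]; omega
      have hslice2 : PySem.List.slice ((a, s) :: rest) (some ((mb + k : Nat) : Int))
            (some ((me + k : Nat) : Int)) = PySem.List.slice d (some ((mb : Nat) : Int)) (some ((me : Nat) : Int)) := by
        rw [PySem.List.slice_natCast, PySem.List.slice_natCast, hsplit]
        rw [show mb + k = k + mb by omega, ← List.drop_drop, List.drop_left' hprelen]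
        congr 1
        omega
      simp only [pvBuild, Prod.map, hf]
      rw [hcb, hce, PySem.List.pyGetD_natCast, PySem.List.pyGetD_natCast, hget, hslice2]
    simp only [Function.comp_def]
    rw [List.map_congr_left htail, hhead]
    -- close with the tail equality and the IH
    have htl : (((0 : Int) :: t).zip t).map (pvBuild d) = join_subsequent_speeches_alt d := by
      unfold join_subsequent_speeches_alt
      rw [PySem.List.slice_from_one, ht, List.tail_cons]
    rw [htl, ih]
    simp [pvRuns, hr, hd]

-- ===== VERDICT (by name: the statement is the Claim_ definition above) =====
theorem join_subsequent_speeches_spec : Claim_equal_join_subsequent_speeches := by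
  intro speeches _
  unfold Spec_join_subsequent_speeches
  rw [pvA_eq_runs, pvAlt_eq_runs]
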